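-- pv_equiv track=rewrite | github.com/NVIDIA/cudnn-frontend | test/python/test_conv_fuzzer.py | compute_channels_last_strides
-- ===== SOURCE A (Python) =====
-- from typing import Optional, Tuple
--
-- def compute_channels_last_strides(shape: Tuple[int, ...]) -> Tuple[int, ...]:
--     """
--     Compute channels-last strides for NHWC (2D) or NDHWC (3D) layout.
--
--     Logical dim order: (N, C, spatial_dims...)
--     Memory order: N, spatial_dims..., C
--
--     For 2D (NCHW logical -> NHWC memory):
--         shape = (N, C, H, W)
--         memory_order = (N, H, W, C) -> strides computed from last to first
--         strides[N] = H*W*C, strides[C] = 1, strides[H] = W*C, strides[W] = C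
--
--     For 3D (NCDHW logical -> NDHWC memory):
--         shape = (N, C, D, H, W)
--         memory_order = (N, D, H, W, C) -> strides computed from last to first
--     """
--     ndim = len(shape)
--     if ndim < 3:
--         raise ValueError(f"Shape must have at least 3 dimensions, got {ndim}")
--
--     # shape = (N, C, spatial_dims...)
--     N = shape[0]
--     C = shape[1]
--     spatial = shape[2:]  # (H, W) or (D, H, W)
--
--     # Memory layout: (N, spatial_dims..., C)
--     # Compute strides from innermost to outermost
--     strides = [0] * ndim
--
--     # C is innermost in memory (stride = 1)
--     strides[1] = 1
--
--     # Spatial dims next (reversed order in memory)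
--     stride = C
--     for i in range(ndim - 1, 1, -1):  # W, H, [D] order
--         strides[i] = stride
--         stride *= shape[i]
--
--     # N is outermost
--     strides[0] = stride
--
--     return tuple(strides)
-- ===== SOURCE B (Python) =====
-- def compute_channels_last_strides(shape):
--     ndim = len(shape)
--     if ndim < 3:
--         raise ValueError(f"Shape must have at least 3 dimensions, got {ndim}")
--     # memory order of the logical dims: N, spatial..., C (C innermost)
--     order = [0] + list(range(2, ndim)) + [1]
--
--     def stride_of(d):
--         # stride of logical dim d = product of the extents of every dim
--         # that sits after d in memory order
--         p = 1
--         for e in order[order.index(d) + 1:]: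
--             p *= shape[e]
--         return p
--
--     return tuple(stride_of(d) for d in range(ndim))
-- ===== Notes on version B (the rewrite author's own statement) =====
-- stated objective: alternative
-- what changed: A fills a preallocated strides array with one descending loop carrying a running stride product; B builds an explicit memory-order permutation and computes each dim's stride independently as the product of the extents of all dims after it in memory order (no running accumulator, no scatter loop).
import Mathlib
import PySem

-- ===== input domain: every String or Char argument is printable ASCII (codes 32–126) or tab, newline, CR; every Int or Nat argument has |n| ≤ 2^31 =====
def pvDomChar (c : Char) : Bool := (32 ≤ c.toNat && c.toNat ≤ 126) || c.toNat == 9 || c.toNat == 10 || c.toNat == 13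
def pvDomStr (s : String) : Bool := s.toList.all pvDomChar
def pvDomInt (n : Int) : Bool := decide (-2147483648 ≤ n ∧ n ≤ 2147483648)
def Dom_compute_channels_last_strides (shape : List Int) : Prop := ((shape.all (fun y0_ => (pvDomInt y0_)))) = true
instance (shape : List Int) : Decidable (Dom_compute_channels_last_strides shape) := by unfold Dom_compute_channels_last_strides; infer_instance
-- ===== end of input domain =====

-- B replaces A's descending running-product fill of a preallocated array with a
-- permutation-table formulation: each logical dim's stride is computed independently as the
-- product of the extents of the dims after it in memory order; equal on all shapes of length ≥ 3.

-- ===== PORT A =====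
-- Literal port of A; the `if ndim < 3` branch is Python's `raise ValueError`, excluded by Pre_.
-- `N = shape[0]` and `spatial = shape[2:]` are dead bindings in A and kept as such.
def compute_channels_last_strides (shape : List Int) : List Int :=
  let ndim := shape.length
  if ndim < 3 then []  -- raise ValueError
  else
    let _N := PySem.List.pyGetD shape 0 0
    let C := PySem.List.pyGetD shape 1 0
    let _spatial := PySem.List.slice shape (some 2) none
    let strides0 := PySem.List.pySetD (List.replicate ndim (0 : Int)) 1 1
    let res := (PySem.List.pyRange ((ndim : Int) - 1) 1 (-1)).foldl
      (fun (st : List Int × Int) i =>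
        (PySem.List.pySetD st.1 i st.2, st.2 * PySem.List.pyGetD shape i 0))
      (strides0, C)
    PySem.List.pySetD res.1 0 res.2

-- ===== PORT B =====
-- Literal port of Source B: `order = [0] + list(range(2, ndim)) + [1]`; `stride_of(d)` multiplies
-- shape[e] over `order[order.index(d)+1:]`; result is the map of stride_of over range(ndim).
-- `order.index(d)` never misses for d in range(ndim); the `none` branch is Python's ValueError.
def compute_channels_last_strides_alt (shape : List Int) : List Int :=
  let ndim := shape.length
  if ndim < 3 then []  -- raise ValueError
  else
    let order : List Int := [0] ++ PySem.List.pyRange 2 (ndim : Int) 1 ++ [1]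
    let strideOf : Int → Int := fun d =>
      let k := (PySem.List.index? order d).getD 0  -- `.index` never misses here (none = ValueError)
      (PySem.List.slice order (some ((k : Int) + 1)) none).foldl
        (fun p e => p * PySem.List.pyGetD shape e 0) 1
    (PySem.List.pyRange 0 (ndim : Int) 1).map strideOf

-- ===== PRECONDITION & SPEC =====
-- Pre_ excludes exactly the shapes of length < 3, on which Python A raises ValueError.
def Pre_compute_channels_last_strides (shape : List Int) : Prop := 3 ≤ shape.length
instance (shape : List Int) : Decidable (Pre_compute_channels_last_strides shape) := by
  unfold Pre_compute_channels_last_strides; infer_instance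
def pvWitness_compute_channels_last_strides : List Int := [2, 3, 4, 5]

def Spec_compute_channels_last_strides (shape : List Int) (out : List Int) : Prop := out = compute_channels_last_strides_alt shape
instance (shape : List Int) (out : List Int) : Decidable (Spec_compute_channels_last_strides shape out) := by unfold Spec_compute_channels_last_strides; infer_instance

-- ===== CLAIM (what is proved, stated in full; the proofs are below) =====
def Claim_equal_compute_channels_last_strides : Prop := ∀ (shape : List Int), Dom_compute_channels_last_strides shape → Pre_compute_channels_last_strides shape → Spec_compute_channels_last_strides shape (compute_channels_last_strides shape)

-- ===== LEMMAS AND PROOFS =====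

-- The common closed form both ports are reduced to (suffix products times C), in foldr form.
def bsf (c : Int) (sp : List Int) : List Int × Int :=
  sp.foldr (fun x r => (r.2 :: r.1, r.2 * x)) ([], c)

theorem bsf_cons (c x : Int) (sp : List Int) :
    bsf c (x :: sp) = ((bsf c sp).2 :: (bsf c sp).1, (bsf c sp).2 * x) := rfl

theorem bsf_snd (c : Int) (sp : List Int) : (bsf c sp).2 = sp.prod * c := by
  induction sp with
  | nil => simp [bsf]
  | cons x t ih => rw [bsf_cons]; simp only [List.prod_cons, ih]; ring

theorem bsf_fst (c : Int) (sp : List Int) :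
    (bsf c sp).1 = (List.range sp.length).map (fun k => (sp.drop (k + 1)).prod * c) := by
  induction sp with
  | nil => simp [bsf]
  | cons x t ih =>
    rw [bsf_cons]
    simp only [List.length_cons, List.range_succ_eq_map, List.map_cons, List.map_map]
    rw [bsf_snd, ih]
    simp [Function.comp]

-- range(a, b, -1) with one more step at the bottom: peel the LAST processed index.
theorem pyRange_neg_one_snoc (a b : Int) (h : b < a) :
    PySem.List.pyRange a b (-1) = PySem.List.pyRange a (b + 1) (-1) ++ [b + 1] := by
  rw [PySem.List.pyRange_neg_one_eq_reverse, PySem.List.pyRange_one_cons (by omega),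
    List.reverse_cons, PySem.List.pyRange_neg_one_eq_reverse]

theorem set_append_cons {α : Type} (pre l : List α) (y v : α) :
    (pre ++ y :: l).set pre.length v = pre ++ v :: l := by
  induction pre with
  | nil => rfl
  | cons p ps ih => simp [ih]

theorem getD_of_drop (shape sp : List Int) (n : Nat) (x : Int)
    (h : shape.drop n = x :: sp) : shape.getD n 0 = x := by
  have h0 : shape[n + 0]? = some x := by
    rw [← List.getElem?_drop, h]; rfl
  simp only [Nat.add_zero] at h0
  simp [List.getD, h0]

-- The invariant of A's descending loop: with positions 0..pre.length-1 already holding `pre`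
-- and `shape.drop pre.length = sp`, the loop writes the suffix strides `bsf` over `rest`.
theorem coreA (shape : List Int) (sp : List Int) :
    ∀ (pre rest : List Int) (s0 : Int),
      rest.length = sp.length → shape.drop pre.length = sp →
      (PySem.List.pyRange ((pre.length : Int) + sp.length - 1) ((pre.length : Int) - 1) (-1)).foldl
        (fun (st : List Int × Int) i =>
          (PySem.List.pySetD st.1 i st.2, st.2 * PySem.List.pyGetD shape i 0))
        (pre ++ rest, s0)
      = (pre ++ (bsf s0 sp).1, (bsf s0 sp).2) := by
  induction sp with
  | nil =>
    intro pre rest s0 hlen _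
    have hrest : rest = [] := List.eq_nil_of_length_eq_zero hlen
    rw [PySem.List.pyRange_neg_one_eq_nil (by simp)]
    simp [bsf, hrest]
  | cons x sp2 ih =>
    intro pre rest s0 hlen hdrop
    obtain ⟨r, rest2, rfl⟩ : ∃ r rest2, rest = r :: rest2 := by
      cases rest with
      | nil => simp at hlen
      | cons r rest2 => exact ⟨r, rest2, rfl⟩
    have hsn : ((x :: sp2).length : Int) = (sp2.length : Int) + 1 := by simp only [List.length_cons]; push_cast; ring
    have hlt : (pre.length : Int) - 1 < (pre.length : Int) + ((x :: sp2).length : Int) - 1 := by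
      rw [hsn]; omega
    rw [pyRange_neg_one_snoc _ _ hlt, List.foldl_append]
    have harg : (pre.length : Int) + ((x :: sp2).length : Int) - 1
        = (((pre ++ [r]).length : Int)) + (sp2.length : Int) - 1 := by
      simp only [List.length_cons, List.length_append, List.length_nil]; push_cast; omega
    have harg2 : (pre.length : Int) - 1 + 1 = ((pre ++ [r]).length : Int) - 1 := by
      simp only [List.length_cons, List.length_append, List.length_nil]; push_cast; omega
    have hdrop2 : shape.drop (pre ++ [r]).length = sp2 := by
      have : shape.drop (pre.length + 1) = sp2 := by
        rw [← List.drop_drop]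
        rw [hdrop]
        rfl
      simpa using this
    have hstate : pre ++ r :: rest2 = (pre ++ [r]) ++ rest2 := by simp
    rw [harg, harg2, hstate, ih (pre ++ [r]) rest2 s0 (by simpa using Nat.succ_injective hlen) hdrop2]
    have hx : PySem.List.pyGetD shape ((pre.length : Int) - 1 + 1) 0 = x := by
      have h0 : (0 : Int) ≤ (pre.length : Int) - 1 + 1 := by omega
      rw [PySem.List.pyGetD_of_nonneg shape 0 h0]
      have : ((pre.length : Int) - 1 + 1).toNat = pre.length := by omega
      rw [this]
      exact getD_of_drop shape sp2 pre.length x hdrop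
    have hset : PySem.List.pySetD ((pre ++ [r]) ++ (bsf s0 sp2).1) ((pre.length : Int) - 1 + 1) (bsf s0 sp2).2
        = pre ++ (bsf s0 sp2).2 :: (bsf s0 sp2).1 := by
      rw [PySem.List.pySetD_of_nonneg _ _ (by omega)]
      have ht : ((pre.length : Int) - 1 + 1).toNat = pre.length := by omega
      rw [ht, List.append_assoc]
      exact set_append_cons pre _ r _
    rw [← harg2]
    simp only [List.foldl_cons, List.foldl_nil, hset, hx, bsf_cons]

-- A's value in closed form.
theorem A_eq_bsf (n c : Int) (sp : List Int) (hsp : 1 ≤ sp.length) :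
    compute_channels_last_strides (n :: c :: sp)
      = (bsf c sp).2 :: 1 :: (bsf c sp).1 := by
  have hng : ¬ (n :: c :: sp).length < 3 := by simp only [List.length_cons]; omega
  have hC : PySem.List.pyGetD (n :: c :: sp) 1 0 = c := by
    simp [PySem.List.pyGetD, PySem.List.pyGet?, PySem.List.pyIdx?]
  have hinit : PySem.List.pySetD (List.replicate (n :: c :: sp).length (0 : Int)) 1 1
      = [0, 1] ++ List.replicate sp.length 0 := by
    rw [PySem.List.pySetD_of_nonneg _ _ (by norm_num)]
    simp [List.replicate_succ]
  have hlenr : (List.replicate sp.length (0 : Int)).length = sp.length := by simp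
  have hdrop : (n :: c :: sp).drop ([0, (1 : Int)]).length = sp := rfl
  have hcore := coreA (n :: c :: sp) sp [0, 1] (List.replicate sp.length 0) c hlenr hdrop
  norm_num at hcore
  have e2 : (2 : Int) + (sp.length : Int) - 1 = (sp.length : Int) + 1 := by omega
  rw [e2] at hcore
  have hrange : ((n :: c :: sp).length : Int) - 1 = (sp.length : Int) + 1 := by
    simp only [List.length_cons]; push_cast; ring
  simp only [compute_channels_last_strides, if_neg hng, hC, hinit,
    List.cons_append, List.nil_append]
  rw [hrange, hcore]
  rw [PySem.List.pySetD_of_nonneg _ _ (by norm_num)]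
  rfl

-- index of a + k in range(a, b).
theorem index?_pyRange_one (k : Nat) : ∀ (a b : Int), (a + k) < b →
    PySem.List.index? (PySem.List.pyRange a b 1) (a + k) = some k := by
  induction k with
  | zero =>
    intro a b h
    rw [PySem.List.pyRange_one_cons (by push_cast at h; omega)]
    rw [show a + ((0 : Nat) : Int) = a by push_cast; ring]
    exact PySem.List.index?_cons_self a _
  | succ m ih =>
    intro a b h
    rw [PySem.List.pyRange_one_cons (by push_cast at h; omega),
      PySem.List.index?_cons_of_ne _ (show a ≠ a + ((m + 1 : Nat) : Int) by push_cast; omega)]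
    rw [show a + ((m + 1 : Nat) : Int) = (a + 1) + (m : Int) by push_cast; ring,
      ih (a + 1) b (by push_cast at h ⊢; omega)]
    rfl

-- dropping j elements of range(a, b) shifts the lower bound.
theorem drop_pyRange_one (j : Nat) : ∀ (a b : Int), a + j ≤ b →
    (PySem.List.pyRange a b 1).drop j = PySem.List.pyRange (a + j) b 1 := by
  induction j with
  | zero => intro a b _; simp
  | succ m ih =>
    intro a b h
    rw [PySem.List.pyRange_one_cons (by push_cast at h; omega)]
    simp only [List.drop_succ_cons]
    rw [ih (a + 1) b (by push_cast at h ⊢; omega)]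
    congr 1
    push_cast; ring

-- B's value in the same closed form.
theorem B_eq_bsf (n c : Int) (sp : List Int) (hsp : 1 ≤ sp.length) :
    compute_channels_last_strides_alt (n :: c :: sp)
      = (bsf c sp).2 :: 1 :: (bsf c sp).1 := by
  have hng : ¬ (n :: c :: sp).length < 3 := by simp only [List.length_cons]; omega
  set m := sp.length with hm
  have hlen : ((n :: c :: sp).length : Int) = (m : Int) + 2 := by
    simp only [List.length_cons, hm]; push_cast; ring
  have hRlen : (PySem.List.pyRange 2 ((m : Int) + 2) 1).length = m := by
    rw [PySem.List.length_pyRange_one]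
    omega
  have hshape_drop : ∀ (j : Nat), (n :: c :: sp).drop (j + 2) = sp.drop j := by
    intro j
    rw [Nat.add_comm j 2, ← List.drop_drop]
    simp
  -- the product fold over lookups at indices range(a, ndim) ++ [1]
  have hC : PySem.List.pyGetD (n :: c :: sp) 1 0 = c := by
    simp [PySem.List.pyGetD, PySem.List.pyGet?, PySem.List.pyIdx?]
  have hfold : ∀ (a : Int), 2 ≤ a → a ≤ (m : Int) + 2 →
      (PySem.List.pyRange a ((m : Int) + 2) 1 ++ [(1 : Int)]).foldl
        (fun p e => p * PySem.List.pyGetD (n :: c :: sp) e 0) 1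
      = (sp.drop (a.toNat - 2)).prod * c := by
    intro a h2 hub
    obtain ⟨j, hj⟩ : ∃ j, a.toNat = j + 2 := ⟨a.toNat - 2, by omega⟩
    rw [List.foldl_append, show ((m : Int) + 2) = (((n :: c :: sp).length : Nat) : Int) from hlen.symm]
    have hfl := PySem.List.foldl_pyRange_pyGetD' (n :: c :: sp) (0 : Int)
      (fun p e => p * e) (1 : Int) (show (0 : Int) ≤ a by omega)
    simp only [] at hfl
    rw [hfl, hj, hshape_drop, show j + 2 - 2 = j from rfl]
    simp only [List.foldl_cons, List.foldl_nil, hC]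
    rw [← List.prod_eq_foldl]
  -- unfold B
  simp only [compute_channels_last_strides_alt, if_neg hng]
  rw [hlen]
  rw [show PySem.List.pyRange 0 ((m : Int) + 2) 1
        = 0 :: 1 :: PySem.List.pyRange 2 ((m : Int) + 2) 1 by
      rw [PySem.List.pyRange_one_cons (by omega), PySem.List.pyRange_one_cons (by omega)]
      norm_num]
  simp only [List.map_cons]
  -- the order list (definitionally 0 :: (range ++ [1]))
  have hord : ([0] ++ PySem.List.pyRange 2 ((m : Int) + 2) 1 ++ [(1 : Int)])
      = (0 : Int) :: (PySem.List.pyRange 2 ((m : Int) + 2) 1 ++ [1]) := rfl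
  have h1notR : (1 : Int) ∉ PySem.List.pyRange 2 ((m : Int) + 2) 1 := by
    rw [PySem.List.mem_pyRange_one]; omega
  have h0 : PySem.List.index? ([0] ++ PySem.List.pyRange 2 ((m : Int) + 2) 1 ++ [1]) (0 : Int)
      = some 0 := by
    rw [hord]
    exact PySem.List.index?_cons_self 0 (PySem.List.pyRange 2 ((m : Int) + 2) 1 ++ [1])
  have h1 : PySem.List.index? ([0] ++ PySem.List.pyRange 2 ((m : Int) + 2) 1 ++ [1]) (1 : Int)
      = some (m + 1) := by
    rw [hord, PySem.List.index?_cons_of_ne _ (show (0 : Int) ≠ 1 by norm_num),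
      PySem.List.index?_append_singleton_self _ 1 h1notR, hRlen]
    rfl
  have hordlen : ([0] ++ PySem.List.pyRange 2 ((m : Int) + 2) 1 ++ [(1 : Int)]).length = m + 2 := by
    simp [hRlen]
  rw [List.cons.injEq, List.cons.injEq]
  refine ⟨?_, ?_, ?_⟩
  · -- stride of dim 0 (N)
    simp only [h0, Option.getD_some]
    rw [show (((0 : Nat) : Int) + 1) = ((1 : Nat) : Int) by norm_num,
      PySem.List.slice_from_natCast, hord, List.drop_one, List.tail_cons]
    rw [hfold 2 (by omega) (by omega)]
    simp [bsf_snd]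
  · -- stride of dim 1 (C)
    simp only [h1, Option.getD_some]
    rw [show (((m + 1 : Nat) : Int) + 1) = ((m + 2 : Nat) : Int) by push_cast; ring,
      PySem.List.slice_from_natCast, List.drop_of_length_le (by rw [hordlen])]
    rfl
  · -- spatial dims
    rw [bsf_fst]
    apply Eq.trans
      (b := List.map (fun d : Int => (List.drop (d.toNat - 1) sp).prod * c)
        (PySem.List.pyRange 2 ((m : Int) + 2) 1))
    · apply List.map_congr_left
      intro d hd
      rw [PySem.List.mem_pyRange_one] at hd
      obtain ⟨k, rfl⟩ : ∃ k : Nat, d = 2 + (k : Int) := ⟨(d - 2).toNat, by omega⟩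
      have hmem : (2 : Int) + (k : Int) ∈ PySem.List.pyRange 2 ((m : Int) + 2) 1 := by
        rw [PySem.List.mem_pyRange_one]; omega
      have hidxR : PySem.List.index? (PySem.List.pyRange 2 ((m : Int) + 2) 1) ((2 : Int) + (k : Int))
          = some k := index?_pyRange_one k 2 ((m : Int) + 2) (by omega)
      have hidx : PySem.List.index? ([0] ++ PySem.List.pyRange 2 ((m : Int) + 2) 1 ++ [1])
          ((2 : Int) + (k : Int)) = some (k + 1) := by
        rw [hord, PySem.List.index?_cons_of_ne _ (show (0 : Int) ≠ 2 + (k : Int) by omega),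
          PySem.List.index?_append_of_mem _ hmem, hidxR]
        rfl
      simp only [hidx, Option.getD_some]
      rw [show (((k + 1 : Nat) : Int) + 1) = ((k + 2 : Nat) : Int) by push_cast; ring,
        PySem.List.slice_from_natCast, hord, List.drop_succ_cons,
        List.drop_append_of_le_length (by rw [hRlen]; omega),
        drop_pyRange_one (k + 1) 2 ((m : Int) + 2) (by push_cast; omega)]
      rw [hfold ((2 : Int) + ((k + 1 : Nat) : Int)) (by push_cast; omega) (by push_cast; omega)]
      rw [show ((2 : Int) + ((k + 1 : Nat) : Int)).toNat - 2 = k + 1 by omega,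
        show ((2 : Int) + (k : Int)).toNat - 1 = k + 1 by omega]
    · rw [PySem.List.pyRange_one 2 ((m : Int) + 2),
        show ((m : Int) + 2 - 2).toNat = m by omega, List.map_map]
      apply List.map_congr_left
      intro k _
      simp only [Function.comp_apply]
      rw [show ((2 : Int) + (k : Int)).toNat - 1 = k + 1 by omega]

-- ===== VERDICT (by name: the statement is the Claim_ definition above) =====
theorem compute_channels_last_strides_spec : Claim_equal_compute_channels_last_strides := by
  intro shape _ hpre
  unfold Spec_compute_channels_last_strides
  obtain ⟨n, sh2, rfl⟩ : ∃ n sh2, shape = n :: sh2 := by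
    cases shape with
    | nil => simp [Pre_compute_channels_last_strides] at hpre
    | cons n sh2 => exact ⟨n, sh2, rfl⟩
  obtain ⟨c, sp, rfl⟩ : ∃ c sp, sh2 = c :: sp := by
    cases sh2 with
    | nil => simp [Pre_compute_channels_last_strides] at hpre
    | cons c sp => exact ⟨c, sp, rfl⟩
  have hsp : 1 ≤ sp.length := by
    simp only [Pre_compute_channels_last_strides, List.length_cons] at hpre
    omega
  rw [A_eq_bsf n c sp hsp, B_eq_bsf n c sp hsp]
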